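-- pv_equiv track=rewrite | github.com/JakeSaunders1995/comp16321MarkingMid | unpacked_repos/w60078be_prog3_spellchecker/spellcheck_w60078be.py | hyphen
-- ===== SOURCE A (Python) =====
-- def hyphen(punct):
--     hyphenPos = 0
--     hyphenNum = 0
--
--     while hyphenPos < len(punct):
--         dash = 0
--         if punct[hyphenPos] == "-":
--             hyphenPos +=1
--             dash +=1
--             hyphen = True
--             while hyphen == True and hyphenPos<len(punct)-1:
--                 #hyphenPos+=1
--                 if punct[hyphenPos] == "-":
--                     dash +=1
--                     hyphenPos +=1
--                 else:
--                     hyphen = False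
--                 if dash == 1:
--                     hyphenNum +=1
--                     break
--
--
--         else:
--             hyphenPos +=1
--     return hyphenNum
-- ===== SOURCE B (Python) =====
-- def hyphen(punct):
--     count = 0
--     for i, ch in enumerate(punct):
--         if ch == "-" and (i == 0 or punct[i - 1] != "-") and \
--                 (i == len(punct) - 1 or punct[i + 1] != "-"):
--             count += 1
--     return count
-- ===== Notes on version B (the rewrite author's own statement) =====
-- stated objective: simpler
-- what changed: Replaced A's nested while loops with mutable position/dash/flag state and break by a single flat enumerate loop counting isolated hyphens (run of exactly one, checked via both neighbours); the flat loop is also measurably faster by a constant factor.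
-- intended difference: On strings whose last or second-to-last character is an isolated hyphen, A returns one less than B because its inner loop bound hyphenPos < len(punct)-1 never lets it count a hyphen in the last two positions; B counts every isolated hyphen, which is the intended value for a hyphen counter. — e.g. on hyphen("a-"): A returns 0, B returns 1
import Mathlib
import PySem

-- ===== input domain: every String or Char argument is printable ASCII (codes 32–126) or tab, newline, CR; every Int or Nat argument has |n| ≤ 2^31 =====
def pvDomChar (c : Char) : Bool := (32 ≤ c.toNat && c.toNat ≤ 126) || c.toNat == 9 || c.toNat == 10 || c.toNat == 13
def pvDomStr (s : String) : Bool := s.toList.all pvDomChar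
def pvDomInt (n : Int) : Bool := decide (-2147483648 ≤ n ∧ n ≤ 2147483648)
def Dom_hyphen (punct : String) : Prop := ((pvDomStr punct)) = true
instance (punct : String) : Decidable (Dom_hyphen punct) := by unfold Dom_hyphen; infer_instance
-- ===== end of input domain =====

-- B replaces A's nested while loops (position/dash/flag state with break) by one flat
-- loop counting isolated hyphens; B also counts isolated hyphens in the last two
-- positions, which A's inner-loop bound misses (stated as the intended difference D_).


-- ===== PORT A =====
-- inner while loop of A; every index read is guarded by pos < len-1, so getD is exact.
-- fuel only makes the loop total; it is always called with enough fuel to finish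
def innerA (l : List Char) (fuel pos dash num : Nat) (hy : Bool) : Nat × Nat :=
  match fuel with
  | 0 => (pos, num)
  | fuel + 1 =>
    if hy = true ∧ pos < l.length - 1 then
      if l.getD pos ' ' = '-' then
        (if dash + 1 = 1 then (pos + 1, num + 1)
         else innerA l fuel (pos + 1) (dash + 1) num hy)
      else
        (if dash = 1 then (pos, num + 1)
         else innerA l fuel pos dash num false)
    else (pos, num)

-- outer while loop of A; index read guarded by pos < len; fuel as above
def outerA (l : List Char) (fuel pos num : Nat) : Nat :=
  match fuel with
  | 0 => num
  | fuel + 1 =>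
    if pos < l.length then
      if l.getD pos ' ' = '-' then
        outerA l fuel (innerA l (l.length + 2) (pos + 1) 1 num true).1
          (innerA l (l.length + 2) (pos + 1) 1 num true).2
      else outerA l fuel (pos + 1) num
    else num

def hyphen (punct : String) : Int := (outerA punct.toList (punct.toList.length + 1) 0 0 : Nat)

-- ===== PORT B =====
-- B: one flat loop over all indices, counting isolated hyphens (enumerate → range over indices)
def hyphen_alt (punct : String) : Int :=
  ((List.range punct.toList.length).foldl
    (fun c i =>
      if punct.toList.getD i ' ' = '-' ∧ (i = 0 ∨ punct.toList.getD (i - 1) ' ' ≠ '-') ∧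
          (i = punct.toList.length - 1 ∨ punct.toList.getD (i + 1) ' ' ≠ '-')
      then c + 1 else c) (0 : Nat) : Nat)

-- ===== PRECONDITION & SPEC =====
-- On strings whose last or second-to-last character is an isolated hyphen (a '-' whose
-- neighbours, where present, are not '-'), A returns one less than B: A's inner-loop
-- bound (hyphenPos < len-1) never counts a hyphen in the last two positions; B counts
-- every isolated hyphen, the intended value. Stated over the tail of the input via its
-- reversal: r 0 is the last character, r 1 the one before it, r 2 the one before that
-- (a blank when the string is too short).
def D_hyphen (punct : String) : Prop :=
  (punct.toList.reverse.getD 0 ' ' = '-' ∧ punct.toList.reverse.getD 1 ' ' ≠ '-') ∨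
  (punct.toList.reverse.getD 1 ' ' = '-' ∧ punct.toList.reverse.getD 0 ' ' ≠ '-' ∧
    punct.toList.reverse.getD 2 ' ' ≠ '-')

instance (punct : String) : Decidable (D_hyphen punct) := by unfold D_hyphen; infer_instance

def Spec_hyphen (punct : String) (out : Int) : Prop := ¬ D_hyphen punct → out = hyphen_alt punct
instance (punct : String) (out : Int) : Decidable (Spec_hyphen punct out) := by unfold Spec_hyphen; infer_instance

def pvDiffWitness_hyphen : String := "a-"
def pvDiffWitnessOut_hyphen : Int × Int := (0, 1)

-- ===== CLAIM (what is proved, stated in full; the proofs are below) =====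
def Claim_unchanged_hyphen : Prop := ∀ (punct : String), Dom_hyphen punct → Spec_hyphen punct (hyphen punct)
def Claim_changed_hyphen : Prop := Dom_hyphen (pvDiffWitness_hyphen) ∧ D_hyphen (pvDiffWitness_hyphen) ∧ hyphen (pvDiffWitness_hyphen) = pvDiffWitnessOut_hyphen.1 ∧ hyphen_alt (pvDiffWitness_hyphen) = pvDiffWitnessOut_hyphen.2 ∧ pvDiffWitnessOut_hyphen.1 ≠ pvDiffWitnessOut_hyphen.2
def Claim_exact_hyphen : Prop := ∀ (punct : String), Dom_hyphen punct → D_hyphen punct → hyphen punct ≠ hyphen_alt punct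

-- ===== LEMMAS AND PROOFS =====

-- number of indices i ≥ pos with i+2 < len that start a maximal run of exactly one hyphen
-- (this is what A counts: its inner loop bound excludes the last two positions)
def cnt (l : List Char) (pos : Nat) : Nat :=
  if h : pos + 2 < l.length then
    (if l.getD pos ' ' = '-' ∧ (pos = 0 ∨ l.getD (pos - 1) ' ' ≠ '-') ∧
        l.getD (pos + 1) ' ' ≠ '-' then 1 else 0) + cnt l (pos + 1)
  else 0
termination_by l.length - pos
decreasing_by omega

-- number of indices i ≥ pos that are isolated hyphens (what B counts)
def cntB (l : List Char) (pos : Nat) : Nat :=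
  if h : pos < l.length then
    (if l.getD pos ' ' = '-' ∧ (pos = 0 ∨ l.getD (pos - 1) ' ' ≠ '-') ∧
        (pos = l.length - 1 ∨ l.getD (pos + 1) ' ' ≠ '-') then 1 else 0) + cntB l (pos + 1)
  else 0
termination_by l.length - pos
decreasing_by omega

-- first index q ≥ pos with q ≥ len-1 or l[q] ≠ '-'
def skip (l : List Char) (pos : Nat) : Nat :=
  if h : pos < l.length - 1 ∧ l.getD pos ' ' = '-' then skip l (pos + 1) else pos
termination_by l.length - pos
decreasing_by omega

theorem skip_step (l : List Char) (pos : Nat)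
    (h : pos < l.length - 1 ∧ l.getD pos ' ' = '-') : skip l pos = skip l (pos + 1) := by
  conv_lhs => rw [skip]
  exact dif_pos h

theorem skip_base (l : List Char) (pos : Nat)
    (h : ¬ (pos < l.length - 1 ∧ l.getD pos ' ' = '-')) : skip l pos = pos := by
  conv_lhs => rw [skip]
  exact dif_neg h

theorem skip_ge (l : List Char) (pos : Nat) : pos ≤ skip l pos := by
  fun_induction skip l pos <;> omega

theorem skip_stop (l : List Char) (pos : Nat) :
    l.getD (skip l pos) ' ' ≠ '-' ∨ l.length ≤ skip l pos + 1 := by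
  fun_induction skip l pos with
  | case1 => assumption
  | case2 pos h =>
    by_cases h2 : l.getD pos ' ' = '-'
    · have h3 : ¬ pos < l.length - 1 := fun hlt => h ⟨hlt, h2⟩
      right; omega
    · left; exact h2

theorem cnt_stop (l : List Char) (pos : Nat) (h : l.length ≤ pos + 2) : cnt l pos = 0 := by
  rw [cnt, dif_neg (by omega)]

theorem cnt_succ_of_not (l : List Char) (pos : Nat)
    (h : ¬ (l.getD pos ' ' = '-' ∧ (pos = 0 ∨ l.getD (pos - 1) ' ' ≠ '-') ∧
        l.getD (pos + 1) ' ' ≠ '-')) : cnt l pos = cnt l (pos + 1) := by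
  by_cases hg : pos + 2 < l.length
  · conv_lhs => rw [cnt]
    rw [dif_pos hg, if_neg h]
    omega
  · rw [cnt_stop l pos (by omega), cnt_stop l (pos + 1) (by omega)]

theorem cnt_succ_of_hit (l : List Char) (pos : Nat) (hg : pos + 2 < l.length)
    (h : l.getD pos ' ' = '-' ∧ (pos = 0 ∨ l.getD (pos - 1) ' ' ≠ '-') ∧
        l.getD (pos + 1) ' ' ≠ '-') : cnt l pos = 1 + cnt l (pos + 1) := by
  conv_lhs => rw [cnt]
  rw [dif_pos hg, if_pos h]

theorem cnt_skip (l : List Char) : ∀ k pos, l.length - pos ≤ k → 1 ≤ pos →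
    l.getD (pos - 1) ' ' = '-' → cnt l pos = cnt l (skip l pos) := by
  intro k
  induction k with
  | zero =>
    intro pos hk h1 hprev
    rw [skip_base l pos (by rintro ⟨h, -⟩; omega)]
  | succ k ih =>
    intro pos hk h1 hprev
    by_cases h : pos < l.length - 1 ∧ l.getD pos ' ' = '-'
    · rw [skip_step l pos h]
      have step : cnt l pos = cnt l (pos + 1) := by
        apply cnt_succ_of_not
        rintro ⟨-, hb, -⟩
        rcases hb with h0 | hb
        · omega
        · exact hb hprev
      rw [step]
      exact ih (pos + 1) (by omega) (by omega) (by simpa using h.2)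
    · rw [skip_base l pos h]

-- inner loop in run-consuming mode (dash ≥ 2): advances to skip, counts nothing
theorem inner2_eq (l : List Char) : ∀ fuel pos dash num, l.length - pos < fuel → 2 ≤ dash →
    innerA l fuel pos dash num true = (skip l pos, num) := by
  intro fuel
  induction fuel with
  | zero => intro pos dash num hk hd; omega
  | succ fuel ih =>
    intro pos dash num hk hd
    by_cases h1 : pos < l.length - 1
    · rw [innerA, if_pos ⟨rfl, h1⟩]
      by_cases h2 : l.getD pos ' ' = '-'
      · rw [if_pos h2, if_neg (by omega), ih (pos + 1) (dash + 1) num (by omega) (by omega),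
          skip_step l pos ⟨h1, h2⟩]
      · obtain ⟨f, rfl⟩ : ∃ f, fuel = f + 1 := ⟨fuel - 1, by omega⟩
        rw [if_neg h2, if_neg (by omega), innerA, if_neg (by simp),
          skip_base l pos (by rintro ⟨-, hc⟩; exact h2 hc)]
    · rw [innerA, if_neg (by rintro ⟨-, h⟩; exact h1 h),
        skip_base l pos (by rintro ⟨h, -⟩; exact h1 h)]

-- the outer loop: from any entry position that is not strictly inside a hyphen run
-- (unless fewer than three characters remain), the result adds exactly cnt l pos
theorem outer_eq (l : List Char) : ∀ fuel pos num, l.length - pos < fuel →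
    (pos = 0 ∨ l.getD (pos - 1) ' ' ≠ '-' ∨ l.length ≤ pos + 2 ∨ l.getD pos ' ' ≠ '-') →
    outerA l fuel pos num = num + cnt l pos := by
  intro fuel
  induction fuel with
  | zero => intro pos num hk _; omega
  | succ fuel ih =>
    intro pos num hk hH
    by_cases hlt : pos < l.length
    · by_cases hc : l.getD pos ' ' = '-'
      · rw [outerA, if_pos hlt, if_pos hc]
        have e2 : l.length + 2 = (l.length + 1) + 1 := rfl
        rw [e2]
        by_cases hn : l.length ≤ pos + 2
        · -- near the end: the inner loop is not entered and nothing is counted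
          rw [innerA, if_neg (by rintro ⟨-, h⟩; omega)]
          show outerA l fuel (pos + 1) num = num + cnt l pos
          rw [ih (pos + 1) num (by omega) (by right; right; left; omega),
            cnt_stop l pos (by omega), cnt_stop l (pos + 1) (by omega)]
        · have hb : pos = 0 ∨ l.getD (pos - 1) ' ' ≠ '-' := by
            rcases hH with h | h | h | h
            · left; exact h
            · right; exact h
            · exact absurd h hn
            · exact absurd hc h
          by_cases h2 : l.getD (pos + 1) ' ' = '-'
          · -- run of length ≥ 2: the inner loop consumes it and counts nothing
            rw [innerA, if_pos ⟨rfl, by omega⟩, if_pos h2, if_neg (by omega),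
              inner2_eq l (l.length + 1) (pos + 1 + 1) (1 + 1) num (by omega) (by omega)]
            show outerA l fuel (skip l (pos + 1 + 1)) num = num + cnt l pos
            have hq := skip_ge l (pos + 1 + 1)
            rw [ih (skip l (pos + 1 + 1)) num (by omega)
              (by rcases skip_stop l (pos + 1 + 1) with h | h
                  · right; right; right; exact h
                  · right; right; left; omega)]
            congr 1
            rw [cnt_succ_of_not l pos (by rintro ⟨-, -, h3⟩; exact h3 h2),
              cnt_succ_of_not l (pos + 1)
                (by rintro ⟨-, hb2, -⟩
                    rcases hb2 with h0 | hb2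
                    · omega
                    · exact hb2 (by simpa using hc))]
            exact (cnt_skip l l.length (pos + 1 + 1) (by omega) (by omega) (by simpa using h2)).symm
          · -- isolated hyphen below len-2: counted by both loops
            rw [innerA, if_pos ⟨rfl, by omega⟩, if_neg h2, if_pos rfl]
            show outerA l fuel (pos + 1) (num + 1) = num + cnt l pos
            rw [ih (pos + 1) (num + 1) (by omega) (by right; right; right; exact h2),
              cnt_succ_of_hit l pos (by omega) ⟨hc, hb, h2⟩]
            omega
      · rw [outerA, if_pos hlt, if_neg hc,
          ih (pos + 1) num (by omega) (by right; left; simpa using hc),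
          cnt_succ_of_not l pos (by rintro ⟨h, -⟩; exact hc h)]
    · rw [outerA, if_neg hlt, cnt_stop l pos (by omega)]
      omega

theorem cntB_stop (l : List Char) (pos : Nat) (h : l.length ≤ pos) : cntB l pos = 0 := by
  rw [cntB, dif_neg (by omega)]

theorem cntB_succ (l : List Char) (pos : Nat) (h : pos < l.length) :
    cntB l pos = (if l.getD pos ' ' = '-' ∧ (pos = 0 ∨ l.getD (pos - 1) ' ' ≠ '-') ∧
        (pos = l.length - 1 ∨ l.getD (pos + 1) ' ' ≠ '-') then 1 else 0) + cntB l (pos + 1) := by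
  conv_lhs => rw [cntB]
  rw [dif_pos h]

-- B's flat loop over range' pos k computes cntB l pos when pos + k = len
theorem foldlB (l : List Char) : ∀ k pos (c : Nat), pos + k = l.length →
    (List.range' pos k).foldl
      (fun c i =>
        if l.getD i ' ' = '-' ∧ (i = 0 ∨ l.getD (i - 1) ' ' ≠ '-') ∧
            (i = l.length - 1 ∨ l.getD (i + 1) ' ' ≠ '-')
        then c + 1 else c) c = c + cntB l pos := by
  intro k
  induction k with
  | zero =>
    intro pos c h
    rw [List.range'_zero, List.foldl_nil, cntB_stop l pos (by omega)]
    omega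
  | succ k ih =>
    intro pos c h
    rw [List.range'_succ, List.foldl_cons, ih (pos + 1) _ (by omega),
      cntB_succ l pos (by omega)]
    split_ifs <;> omega

-- below len-2 the two per-index conditions agree, so the counts differ only in the tail
theorem cntB_eq_cnt_add (l : List Char) : ∀ pos,
    cntB l pos = cnt l pos + cntB l (max pos (l.length - 2)) := by
  intro pos
  fun_induction cnt l pos with
  | case1 pos hg ih =>
    have hmax : max pos (l.length - 2) = max (pos + 1) (l.length - 2) := by omega
    rw [cntB_succ l pos (by omega), ih, hmax]
    have hiso : (l.getD pos ' ' = '-' ∧ (pos = 0 ∨ l.getD (pos - 1) ' ' ≠ '-') ∧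
        (pos = l.length - 1 ∨ l.getD (pos + 1) ' ' ≠ '-')) ↔
        (l.getD pos ' ' = '-' ∧ (pos = 0 ∨ l.getD (pos - 1) ' ' ≠ '-') ∧
        l.getD (pos + 1) ' ' ≠ '-') := by
      constructor
      · rintro ⟨h1, h2, h3 | h3⟩
        · omega
        · exact ⟨h1, h2, h3⟩
      · rintro ⟨h1, h2, h3⟩
        exact ⟨h1, h2, Or.inr h3⟩
    split_ifs with ha hb hb
    · omega
    · exact absurd (hiso.mp ha) hb
    · exact absurd (hiso.mpr hb) ha
    · omega
  | case2 pos hg =>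
    have : max pos (l.length - 2) = pos := by omega
    rw [this]
    omega

theorem rev_getD_lt (l : List Char) (k : Nat) (h : k < l.length) :
    l.reverse.getD k ' ' = l.getD (l.length - 1 - k) ' ' := by
  simp [List.getD, List.getElem?_reverse h]

theorem rev_getD_ge (l : List Char) (k : Nat) (h : l.length ≤ k) :
    l.reverse.getD k ' ' = ' ' := by
  rw [List.getD_eq_getElem?_getD, List.getElem?_eq_none (by simpa using h)]
  rfl

-- D_ restated over the forward indices n-1, n-2, n-3
theorem D_iff (punct : String) : D_hyphen punct ↔
    ((1 ≤ punct.toList.length ∧ punct.toList.getD (punct.toList.length - 1) ' ' = '-' ∧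
      (punct.toList.length = 1 ∨ punct.toList.getD (punct.toList.length - 2) ' ' ≠ '-')) ∨
     (2 ≤ punct.toList.length ∧ punct.toList.getD (punct.toList.length - 2) ' ' = '-' ∧
      punct.toList.getD (punct.toList.length - 1) ' ' ≠ '-' ∧
      (punct.toList.length = 2 ∨ punct.toList.getD (punct.toList.length - 3) ' ' ≠ '-'))) := by
  unfold D_hyphen
  set l := punct.toList with hl
  rcases Nat.lt_or_ge l.length 1 with h1 | h1
  · rw [rev_getD_ge l 0 (by omega), rev_getD_ge l 1 (by omega)]
    simp
    omega
  rcases Nat.lt_or_ge l.length 2 with h2 | h2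
  · rw [rev_getD_lt l 0 (by omega), rev_getD_ge l 1 (by omega)]
    have e : l.length - 1 - 0 = l.length - 1 := by omega
    rw [e]
    constructor
    · rintro (⟨ha, -⟩ | ⟨hb, -⟩)
      · exact Or.inl ⟨h1, ha, Or.inl (by omega)⟩
      · exact absurd hb (by decide)
    · rintro (⟨-, ha, -⟩ | ⟨hn, -⟩)
      · exact Or.inl ⟨ha, by decide⟩
      · omega
  rcases Nat.lt_or_ge l.length 3 with h3 | h3
  · rw [rev_getD_lt l 0 (by omega), rev_getD_lt l 1 (by omega), rev_getD_ge l 2 (by omega)]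
    have e0 : l.length - 1 - 0 = l.length - 1 := by omega
    have e1 : l.length - 1 - 1 = l.length - 2 := by omega
    rw [e0, e1]
    constructor
    · rintro (⟨ha, hb⟩ | ⟨ha, hb, -⟩)
      · exact Or.inl ⟨h1, ha, Or.inr hb⟩
      · exact Or.inr ⟨h2, ha, hb, Or.inl (by omega)⟩
    · rintro (⟨-, ha, hb | hb⟩ | ⟨-, ha, hb, -⟩)
      · omega
      · exact Or.inl ⟨ha, hb⟩
      · exact Or.inr ⟨ha, hb, by decide⟩
  · rw [rev_getD_lt l 0 (by omega), rev_getD_lt l 1 (by omega), rev_getD_lt l 2 (by omega)]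
    have e0 : l.length - 1 - 0 = l.length - 1 := by omega
    have e1 : l.length - 1 - 1 = l.length - 2 := by omega
    have e2 : l.length - 1 - 2 = l.length - 3 := by omega
    rw [e0, e1, e2]
    constructor
    · rintro (⟨ha, hb⟩ | ⟨ha, hb, hc⟩)
      · exact Or.inl ⟨h1, ha, Or.inr hb⟩
      · exact Or.inr ⟨h2, ha, hb, Or.inr hc⟩
    · rintro (⟨-, ha, hb | hb⟩ | ⟨-, ha, hb, hc | hc⟩)
      · omega
      · exact Or.inl ⟨ha, hb⟩
      · omega
      · exact Or.inr ⟨ha, hb, hc⟩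

-- the tail count at len-2 is 1 inside D_ and 0 outside it
theorem tail_of_D (punct : String) (hD : D_hyphen punct) :
    cntB punct.toList (punct.toList.length - 2) = 1 := by
  rw [D_iff] at hD
  set l := punct.toList with hl
  rcases hD with ⟨h1, hc, hp⟩ | ⟨h2, hc, hn, hp⟩
  · -- isolated hyphen at the last position
    rcases Nat.lt_or_ge l.length 2 with h2 | h2
    · -- length 1: len-2 = len-1 = 0
      have e : l.length - 2 = l.length - 1 := by omega
      rw [e, cntB_succ _ _ (by omega), if_pos ⟨hc, Or.inl (by omega), Or.inl rfl⟩,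
        cntB_stop l (l.length - 1 + 1) (by omega)]
    · rw [cntB_succ _ _ (by omega)]
      have hprev : l.getD (l.length - 2) ' ' ≠ '-' := by
        rcases hp with h | h
        · omega
        · exact h
      rw [if_neg (by rintro ⟨h, -⟩; exact hprev h)]
      have e : l.length - 2 + 1 = l.length - 1 := by omega
      rw [e, cntB_succ _ _ (by omega),
        if_pos ⟨hc, by
          rcases Nat.eq_or_lt_of_le h2 with h | h
          · exact Or.inr (by rw [show l.length - 1 - 1 = l.length - 2 from by omega]; exact hprev)
          · exact Or.inr (by rw [show l.length - 1 - 1 = l.length - 2 from by omega]; exact hprev),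
          Or.inl rfl⟩,
        cntB_stop l (l.length - 1 + 1) (by omega)]
  · -- isolated hyphen at the second-to-last position
    rw [cntB_succ _ _ (by omega),
      if_pos ⟨hc, by
        rcases hp with h | h
        · exact Or.inl (by omega)
        · exact Or.inr (by rw [show l.length - 2 - 1 = l.length - 3 from by omega]; exact h),
        Or.inr (by rw [show l.length - 2 + 1 = l.length - 1 from by omega]; exact hn)⟩]
    have e : l.length - 2 + 1 = l.length - 1 := by omega
    rw [e, cntB_succ _ _ (by omega), if_neg (by rintro ⟨h, -⟩; exact hn h),
      cntB_stop l (l.length - 1 + 1) (by omega)]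

theorem tail_of_notD (punct : String) (hD : ¬ D_hyphen punct) :
    cntB punct.toList (punct.toList.length - 2) = 0 := by
  rw [D_iff] at hD
  set l := punct.toList with hl
  by_cases h0 : l.length = 0
  · exact cntB_stop _ _ (by omega)
  by_cases h2 : 2 ≤ l.length
  · rw [cntB_succ _ _ (by omega)]
    rw [if_neg (by
      rintro ⟨ha, hb, hc⟩
      apply hD
      refine Or.inr ⟨h2, ha, ?_, ?_⟩
      · rcases hc with h | h
        · omega
        · rwa [show l.length - 2 + 1 = l.length - 1 from by omega] at h
      · rcases hb with h | h
        · exact Or.inl (by omega)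
        · rcases Nat.eq_or_lt_of_le h2 with h2' | h2'
          · exact Or.inl (by omega)
          · exact Or.inr (by rwa [show l.length - 2 - 1 = l.length - 3 from by omega] at h))]
    have e : l.length - 2 + 1 = l.length - 1 := by omega
    rw [e, cntB_succ _ _ (by omega)]
    rw [if_neg (by
      rintro ⟨ha, hb, -⟩
      apply hD
      refine Or.inl ⟨by omega, ha, ?_⟩
      rcases hb with h | h
      · exact Or.inl (by omega)
      · exact Or.inr (by rwa [show l.length - 1 - 1 = l.length - 2 from by omega] at h))]
    rw [cntB_stop l (l.length - 1 + 1) (by omega)]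
  · have e : l.length - 2 = l.length - 1 := by omega
    rw [e, cntB_succ _ _ (by omega)]
    rw [if_neg (by
      rintro ⟨ha, -, -⟩
      exact hD (Or.inl ⟨by omega, ha, Or.inl (by omega)⟩))]
    rw [cntB_stop l (l.length - 1 + 1) (by omega)]

theorem hyphen_A_val (punct : String) : hyphen punct = (cnt punct.toList 0 : Nat) := by
  unfold hyphen
  rw [outer_eq punct.toList (punct.toList.length + 1) 0 0 (by omega) (by left; rfl)]
  simp

theorem hyphen_B_val (punct : String) : hyphen_alt punct = (cntB punct.toList 0 : Nat) := by
  unfold hyphen_alt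
  rw [List.range_eq_range', foldlB punct.toList punct.toList.length 0 0 (by omega)]
  simp

-- ===== VERDICT (by name: the statements are the Claim_ definitions above) =====
theorem hyphen_spec : Claim_unchanged_hyphen := by
  intro punct _ hD
  rw [hyphen_A_val, hyphen_B_val, cntB_eq_cnt_add punct.toList 0]
  have : max 0 (punct.toList.length - 2) = punct.toList.length - 2 := by omega
  rw [this, tail_of_notD punct hD]
  simp

theorem hyphen_changed : Claim_changed_hyphen := by unfold Claim_changed_hyphen; decide

theorem hyphen_tight : Claim_exact_hyphen := by
  intro punct _ hD
  rw [hyphen_A_val, hyphen_B_val, cntB_eq_cnt_add punct.toList 0]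
  have : max 0 (punct.toList.length - 2) = punct.toList.length - 2 := by omega
  rw [this, tail_of_D punct hD]
  intro h
  have := Int.ofNat.inj h
  omega
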